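-- pv_equiv track=rewrite | github.com/technosutra21/technosutra | characters/parser_corrigido.py | extrair_subsecoes
-- ===== SOURCE A (Python) =====
-- from typing import Dict, List, Any
--
-- def extrair_subsecoes(conteudo: str) -> List[Dict[str, str]]:
--     """Extrai subseções dentro de uma seção maior"""
--     subsecoes = []
--     linhas = conteudo.split('\n')
--
--     subsecao_atual = None
--
--     for linha in linhas:
--         linha_limpa = linha.strip()
--
--         # Detecta subseções (linhas que possuem dois pontos e mais de três caracteres)
--         if ':' in linha_limpa and len(linha_limpa) > 3:
--             if subsecao_atual:
--                 subsecoes.append(subsecao_atual)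
--
--             subsecao_atual = {
--                 'subtitulo': linha_limpa,
--                 'conteudo': ''
--             }
--         elif subsecao_atual and linha_limpa:
--             subsecao_atual['conteudo'] += ('\n' + linha) if subsecao_atual['conteudo'] else linha
--
--     # Adiciona última subseção
--     if subsecao_atual:
--         subsecoes.append(subsecao_atual)
--
--     return subsecoes
-- ===== SOURCE B (Python) =====
-- from typing import Dict, List
--
-- def extrair_subsecoes(conteudo: str) -> List[Dict[str, str]]:
--     """Extrai subseções: tabela de índices de cabeçalhos + reconstrução por fatias."""
--     linhas = conteudo.split('\n')
--     cabecalhos = [i for i, linha in enumerate(linhas)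
--                   if ':' in linha.strip() and len(linha.strip()) > 3]
--     limites = cabecalhos + [len(linhas)]
--     return [{'subtitulo': linhas[i].strip(),
--              'conteudo': '\n'.join(l for l in linhas[i + 1:j] if l.strip())}
--             for i, j in zip(limites, limites[1:])]
-- ===== Notes on version B (the rewrite author's own statement) =====
-- stated objective: alternative
-- what changed: A's single stateful accumulation loop (current-subsection dict mutated line by line) is replaced by two passes: first record the indices of all header lines, then rebuild each subsection by slicing the original lines between consecutive header indices and joining the non-blank ones.
import Mathlib
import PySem

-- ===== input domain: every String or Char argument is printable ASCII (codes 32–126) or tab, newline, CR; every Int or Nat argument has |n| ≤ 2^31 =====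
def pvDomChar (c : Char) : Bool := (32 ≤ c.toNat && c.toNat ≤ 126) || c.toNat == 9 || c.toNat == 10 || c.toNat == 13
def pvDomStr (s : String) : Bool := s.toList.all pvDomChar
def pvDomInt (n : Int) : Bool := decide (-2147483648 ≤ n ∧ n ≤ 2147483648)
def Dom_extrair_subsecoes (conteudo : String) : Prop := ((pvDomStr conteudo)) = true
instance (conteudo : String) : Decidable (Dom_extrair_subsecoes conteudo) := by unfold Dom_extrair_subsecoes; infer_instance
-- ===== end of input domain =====

-- B replaces A's single stateful line-scan by a header-index table plus slice-based
-- reconstruction (objective: alternative decomposition, same results).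

-- Header test both sources perform: ':' in linha.strip() and len(linha.strip()) > 3
def ehCab (linha : String) : Bool :=
  PySem.Str.isIn ":" (PySem.Str.strip linha) && 3 < PySem.Str.len (PySem.Str.strip linha)

-- the dict {'subtitulo': t, 'conteudo': c}
def dictSub (t c : String) : List (String × String) := [("subtitulo", t), ("conteudo", c)]

-- ===== PORT A =====
-- loop body of A: state = (subsecoes, subsecao_atual)
def passoA (st : List (List (String × String)) × Option (String × String)) (linha : String) :
    List (List (String × String)) × Option (String × String) :=
  let limpa := PySem.Str.strip linha
  if PySem.Str.isIn ":" limpa && 3 < PySem.Str.len limpa then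
    match st.2 with
    | some (t, c) => (st.1 ++ [dictSub t c], some (limpa, ""))
    | none => (st.1, some (limpa, ""))
  else
    match st.2 with
    | some (t, c) =>
      if limpa ≠ "" then
        (st.1, some (t, if c = "" then linha else c ++ ("\n" ++ linha)))
      else st
    | none => st

def extrair_subsecoes (conteudo : String) : List (List (String × String)) :=
  let linhas := (PySem.Str.split? conteudo "\n").getD []
  let fin := linhas.foldl passoA ([], none)
  match fin.2 with
  | some (t, c) => fin.1 ++ [dictSub t c]
  | none => fin.1

-- ===== PORT B =====
-- one entry of B's comprehension, for a pair (i, j) of consecutive bounds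
def entradaB (linhas : List String) (p : Int × Int) : List (String × String) :=
  [("subtitulo", PySem.Str.strip (PySem.List.pyGetD linhas p.1 "")),
   ("conteudo", PySem.Str.join "\n"
      ((PySem.List.slice linhas (some (p.1 + 1)) (some p.2)).filter
        (fun l => !(PySem.Str.strip l == ""))))]

def extrair_subsecoes_alt (conteudo : String) : List (List (String × String)) :=
  let linhas := (PySem.Str.split? conteudo "\n").getD []
  let cabecalhos := ((PySem.List.enumerate linhas).filter (fun p => ehCab p.2)).map Prod.fst
  let limites := cabecalhos ++ [(linhas.length : Int)]
  (limites.zip limites.tail).map (entradaB linhas)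

-- ===== PRECONDITION & SPEC =====
def Spec_extrair_subsecoes (conteudo : String) (out : List (List (String × String))) : Prop := out = extrair_subsecoes_alt conteudo
instance (conteudo : String) (out : List (List (String × String))) : Decidable (Spec_extrair_subsecoes conteudo out) := by unfold Spec_extrair_subsecoes; infer_instance

-- ===== CLAIM (what is proved, stated in full; the proofs are below) =====
def Claim_equal_extrair_subsecoes : Prop := ∀ (conteudo : String), Dom_extrair_subsecoes conteudo → Spec_extrair_subsecoes conteudo (extrair_subsecoes conteudo)

-- ===== LEMMAS AND PROOFS =====

theorem ehCab_eq (l : String) :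
    (PySem.Str.isIn ":" (PySem.Str.strip l) && decide (3 < PySem.Str.len (PySem.Str.strip l)))
      = ehCab l := rfl

theorem strEq_of_toList {s t : String} (h : s.toList = t.toList) : s = t := by
  ext1
  simpa using h

theorem strJoin_singleton (sep x : String) : PySem.Str.join sep [x] = x :=
  strEq_of_toList (by simp [PySem.Str.toList_join, PySem.Chars.join_singleton])

theorem strJoin_cons_cons (sep a b : String) (t : List String) :
    PySem.Str.join sep (a :: b :: t) = a ++ (sep ++ PySem.Str.join sep (b :: t)) :=
  strEq_of_toList (by
    simp [PySem.Str.toList_join, PySem.Chars.join_cons_cons, String.toList_append])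

theorem ne_empty_of_strip_ne (l : String) (h : PySem.Str.strip l ≠ "") : l ≠ "" := by
  intro he
  subst he
  exact h rfl

theorem append_ne_empty (c x : String) : c ++ ("\n" ++ x) ≠ "" := by
  intro h
  have := congrArg String.toList h
  simp [String.toList_append] at this

-- reference spec: recursive span decomposition both ports are reduced to
def stepC (c l : String) : String := if c = "" then l else c ++ ("\n" ++ l)

def fromCur (t c : String) : List String → List (List (String × String))
  | [] => [dictSub t c]
  | l :: ls =>
    if ehCab l then dictSub t c :: fromCur (PySem.Str.strip l) "" ls
    else if PySem.Str.strip l = "" then fromCur t c ls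
    else fromCur t (stepC c l) ls

def fromNone : List String → List (List (String × String))
  | [] => []
  | l :: ls => if ehCab l then fromCur (PySem.Str.strip l) "" ls else fromNone ls

-- ===== A-side reduction =====
def finishA (st : List (List (String × String)) × Option (String × String)) :
    List (List (String × String)) :=
  match st.2 with
  | some (t, c) => st.1 ++ [dictSub t c]
  | none => st.1

def contA (cur : Option (String × String)) (ls : List String) : List (List (String × String)) :=
  match cur with
  | some (t, c) => fromCur t c ls
  | none => fromNone ls

theorem foldA_eq (ls : List String) :
    ∀ (acc : List (List (String × String))) (cur : Option (String × String)),
    finishA (ls.foldl passoA (acc, cur)) = acc ++ contA cur ls := by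
  induction ls with
  | nil =>
    intro acc cur
    cases cur with
    | none => simp [finishA, contA, fromNone]
    | some tc => cases tc with | mk t c => simp [finishA, contA, fromCur]
  | cons l ls ih =>
    intro acc cur
    cases hcb : ehCab l with
    | true =>
      cases cur with
      | none =>
        simp only [List.foldl_cons, passoA, ehCab_eq, hcb, if_true]
        rw [ih]
        simp [contA, fromNone, hcb]
      | some tc =>
        cases tc with | mk t c =>
        simp only [List.foldl_cons, passoA, ehCab_eq, hcb, if_true]
        rw [ih]
        simp [contA, fromCur, hcb]
    | false =>
      by_cases he : PySem.Str.strip l = ""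
      · cases cur with
        | none =>
          simp only [List.foldl_cons, passoA, ehCab_eq, hcb]
          rw [if_neg (by simp)]
          rw [ih]
          simp [contA, fromNone, hcb]
        | some tc =>
          cases tc with | mk t c =>
          simp only [List.foldl_cons, passoA, ehCab_eq, hcb]
          rw [if_neg (by simp), if_neg (by simp [he])]
          rw [ih]
          simp [contA, fromCur, hcb, he]
      · cases cur with
        | none =>
          simp only [List.foldl_cons, passoA, ehCab_eq, hcb]
          rw [if_neg (by simp)]
          rw [ih]
          simp [contA, fromNone, hcb]
        | some tc =>
          cases tc with | mk t c =>
          simp only [List.foldl_cons, passoA, ehCab_eq, hcb]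
          rw [if_neg (by simp), if_pos (by simp [he])]
          rw [ih]
          simp [contA, fromCur, hcb, he, stepC]

theorem portA_eq_fromNone (conteudo : String) :
    extrair_subsecoes conteudo = fromNone ((PySem.Str.split? conteudo "\n").getD []) := by
  show finishA _ = _
  rw [foldA_eq]
  simp [contA]

-- ===== B-side reduction =====
-- Nat-level header index table
def natHdr : List String → List Nat
  | [] => []
  | l :: ls => if ehCab l then 0 :: (natHdr ls).map (· + 1) else (natHdr ls).map (· + 1)

def firstHdr : List String → Nat
  | [] => 0
  | l :: ls => if ehCab l then 0 else firstHdr ls + 1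

def bodyOf (linhas : List String) (i j : Nat) : List String :=
  ((linhas.drop (i + 1)).take (j - (i + 1))).filter (fun l => !(PySem.Str.strip l == ""))

def natPairs (ls : List String) : List (Nat × Nat) :=
  (natHdr ls ++ [ls.length]).zip (natHdr ls ++ [ls.length]).tail

def natEntrada (ls : List String) (p : Nat × Nat) : List (String × String) :=
  dictSub (PySem.Str.strip (ls.getD p.1 "")) (PySem.Str.join "\n" (bodyOf ls p.1 p.2))

theorem enumerate_shift {α : Type} (xs : List α) :
    ∀ s : Int, PySem.List.enumerate xs (s + 1)
      = (PySem.List.enumerate xs s).map (fun p => (p.1 + 1, p.2)) := by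
  induction xs with
  | nil => intro s; rfl
  | cons x xs ih =>
    intro s
    show (s + 1, x) :: PySem.List.enumerate xs (s + 1 + 1) = _
    rw [show PySem.List.enumerate (x :: xs) s = (s, x) :: PySem.List.enumerate xs (s + 1) from rfl]
    rw [List.map_cons, ih (s + 1)]

theorem filter_fst_shift (E : List (Int × String)) :
    ((E.map (fun p => (p.1 + 1, p.2))).filter (fun p => ehCab p.2)).map Prod.fst
      = ((E.filter (fun p => ehCab p.2)).map Prod.fst).map (· + 1) := by
  induction E with
  | nil => rfl
  | cons e E ihE =>
    cases hcb : ehCab e.2 <;> simp [List.filter_cons, hcb, ihE]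

theorem castShiftMap (H : List Nat) :
    (H.map (fun n : Nat => (n : Int))).map (· + 1) = (H.map (· + 1)).map (fun n : Nat => (n : Int)) := by
  rw [List.map_map, List.map_map]
  exact List.map_congr_left fun n _ => by simp only [Function.comp_apply]; omega

theorem hdr_eq_natHdr (ls : List String) :
    ((PySem.List.enumerate ls).filter (fun p => ehCab p.2)).map Prod.fst
      = (natHdr ls).map (fun n : Nat => (n : Int)) := by
  induction ls with
  | nil => rfl
  | cons l ls ih =>
    rw [show PySem.List.enumerate (l :: ls) 0 = (0, l) :: PySem.List.enumerate ls (0 + 1) from rfl,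
        enumerate_shift]
    cases hcb : ehCab l with
    | true =>
      rw [List.filter_cons]
      simp only [show ehCab (((0 : Int), l)).2 = true from hcb, decide_true, if_true,
        List.map_cons, natHdr, hcb]
      rw [filter_fst_shift, ih, castShiftMap]
      simp
    | false =>
      rw [List.filter_cons]
      simp only [show ehCab (((0 : Int), l)).2 = false from hcb, decide_false,
        Bool.false_eq_true, if_false, natHdr, hcb]
      rw [filter_fst_shift, ih, castShiftMap]

theorem natHdr_lt (ls : List String) : ∀ n ∈ natHdr ls, n < ls.length := by
  induction ls with
  | nil => intro n h; simp [natHdr] at h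
  | cons l ls ih =>
    intro n h
    unfold natHdr at h
    split at h
    · rcases List.mem_cons.1 h with h0 | h1
      · subst h0; simp
      · rcases List.mem_map.1 h1 with ⟨m, hm, rfl⟩
        have := ih m hm; simp; omega
    · rcases List.mem_map.1 h with ⟨m, hm, rfl⟩
      have := ih m hm; simp; omega

theorem firstHdr_headD (ls : List String) :
    (natHdr ls ++ [ls.length]).headD 0 = firstHdr ls := by
  induction ls with
  | nil => rfl
  | cons l ls ih =>
    unfold natHdr firstHdr
    split
    · rfl
    · cases hH : natHdr ls <;> (rw [hH] at ih; simp at ih ⊢; omega)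

theorem entradaB_nat (linhas : List String) (i j : Nat) (hi : i < linhas.length)
    (hj : j ≤ linhas.length) :
    entradaB linhas ((i : Nat), (j : Nat)) = natEntrada linhas (i, j) := by
  unfold entradaB natEntrada dictSub bodyOf
  have h1 : PySem.List.pyGetD linhas ((i : Nat) : Int) "" = linhas.getD i "" :=
    PySem.List.pyGetD_natCast linhas i ""
  have hcast : ((i : Nat) : Int) + 1 = (((i + 1 : Nat)) : Int) := by push_cast; ring
  have h2 : PySem.List.slice linhas (some (((i : Nat) : Int) + 1)) (some ((j : Nat) : Int))
      = (linhas.drop (i + 1)).take (j - (i + 1)) := by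
    rw [hcast]
    rw [PySem.List.slice_of_nonneg linhas (by positivity) (by positivity)
        (by exact_mod_cast hi) (by exact_mod_cast hj)]
    simp
  simp only at h1 h2 ⊢
  rw [h1, h2]

theorem foldl_stepC_ne (xs : List String) :
    ∀ c : String, c ≠ "" →
    xs.foldl stepC c = (if xs = [] then c else c ++ ("\n" ++ PySem.Str.join "\n" xs)) := by
  induction xs with
  | nil => intro c _; simp
  | cons x xs ih =>
    intro c hc
    rw [List.foldl_cons, show stepC c x = c ++ ("\n" ++ x) from by simp [stepC, hc]]
    rw [ih _ (append_ne_empty c x)]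
    cases xs with
    | nil => simp [strJoin_singleton]
    | cons y t =>
      rw [if_neg (List.cons_ne_nil _ _), if_neg (List.cons_ne_nil _ _), strJoin_cons_cons]
      rw [String.append_assoc, String.append_assoc]

theorem foldl_stepC_join (xs : List String) (h : ∀ x ∈ xs, x ≠ "") :
    xs.foldl stepC "" = PySem.Str.join "\n" xs := by
  cases xs with
  | nil => exact strEq_of_toList (by simp [PySem.Str.toList_join, PySem.Chars.join_nil])
  | cons x t =>
    rw [List.foldl_cons, show stepC "" x = x from by simp [stepC]]
    have hx : x ≠ "" := h x (by simp)
    rw [foldl_stepC_ne t x hx]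
    cases t with
    | nil => simp [strJoin_singleton]
    | cons y t' =>
      rw [if_neg (List.cons_ne_nil _ _), strJoin_cons_cons]

theorem fromCur_span (ls : List String) :
    ∀ t c, fromCur t c ls
      = dictSub t (((ls.take (firstHdr ls)).filter (fun l => !(PySem.Str.strip l == ""))).foldl stepC c)
        :: fromNone ls := by
  induction ls with
  | nil => intro t c; simp [fromCur, fromNone, firstHdr]
  | cons l ls ih =>
    intro t c
    unfold fromCur firstHdr fromNone
    cases hcb : ehCab l with
    | true => simp [hcb]
    | false =>
      by_cases he : PySem.Str.strip l = ""
      · simp only [hcb, Bool.false_eq_true, if_false, he, if_true, if_pos rfl]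
        rw [ih t c]
        simp [List.take_succ_cons, List.filter_cons, he]
      · simp only [hcb, Bool.false_eq_true, if_false, if_neg he]
        rw [ih t (stepC c l)]
        simp [List.take_succ_cons, List.filter_cons, he]

theorem mem_zip_tail {L : List Nat} :
    ∀ p ∈ L.zip L.tail, p.1 ∈ L.dropLast ∧ p.2 ∈ L.tail := by
  induction L with
  | nil => intro p h; simp at h
  | cons x L ih =>
    intro p h
    cases L with
    | nil => simp at h
    | cons y T =>
      rw [show (x :: y :: T).zip (x :: y :: T).tail = (x, y) :: ((y :: T).zip (y :: T).tail) from rfl] at h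
      rcases List.mem_cons.1 h with h0 | h1
      · subst h0
        constructor
        · simp [List.dropLast_cons_of_ne_nil]
        · simp
      · have := ih p h1
        constructor
        · rw [List.dropLast_cons_of_ne_nil (by simp)]
          exact List.mem_cons_of_mem _ this.1
        · exact List.mem_cons_of_mem _ this.2

theorem natPairs_bounds (ls : List String) :
    ∀ p ∈ natPairs ls, p.1 < ls.length ∧ p.2 ≤ ls.length := by
  intro p hp
  have h := mem_zip_tail p hp
  constructor
  · have h1 : p.1 ∈ natHdr ls := by
      have := h.1
      rwa [List.dropLast_concat] at this
    exact natHdr_lt ls p.1 h1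
  · have h2 : p.2 ∈ natHdr ls ++ [ls.length] := List.mem_of_mem_tail h.2
    rcases List.mem_append.1 h2 with hh | hl
    · exact Nat.le_of_lt (natHdr_lt ls p.2 hh)
    · simp at hl; omega

theorem natBuild_eq_fromNone (ls : List String) :
    (natPairs ls).map (natEntrada ls) = fromNone ls := by
  induction ls with
  | nil => rfl
  | cons l ls ih =>
    have hshift : ∀ p : Nat × Nat,
        natEntrada (l :: ls) (p.1 + 1, p.2 + 1) = natEntrada ls p := by
      intro p
      have harith : p.2 + 1 - (p.1 + 1 + 1) = p.2 - (p.1 + 1) := by omega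
      simp [natEntrada, bodyOf, harith]
    cases hcb : ehCab l with
    | false =>
      have hL : natHdr (l :: ls) ++ [(l :: ls).length]
          = (natHdr ls ++ [ls.length]).map (· + 1) := by
        simp [natHdr, hcb]
      unfold natPairs
      rw [hL, ← List.map_tail, List.zip_map]
      rw [List.map_map]
      have : (natEntrada (l :: ls) ∘ Prod.map (· + 1) (· + 1))
          = fun p : Nat × Nat => natEntrada (l :: ls) (p.1 + 1, p.2 + 1) := rfl
      rw [this]
      rw [show (fun p : Nat × Nat => natEntrada (l :: ls) (p.1 + 1, p.2 + 1))
            = natEntrada ls from funext fun p => hshift p]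
      rw [show (natHdr ls ++ [ls.length]).zip (natHdr ls ++ [ls.length]).tail = natPairs ls from rfl]
      rw [ih]
      simp [fromNone, hcb]
    | true =>
      cases hM : natHdr ls ++ [ls.length] with
      | nil => exact absurd hM (by simp)
      | cons m0 L' =>
        have hm0 : m0 = firstHdr ls := by
          have := firstHdr_headD ls
          rw [hM] at this
          simpa using this
        have hL : natHdr (l :: ls) ++ [(l :: ls).length]
            = 0 :: (m0 + 1) :: L'.map (· + 1) := by
          simp only [natHdr, hcb, if_true, List.cons_append, List.length_cons]
          congr 1
          rw [show ([ls.length + 1] : List Nat) = [ls.length].map (· + 1) from rfl,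
              ← List.map_append, hM]
          rfl
        unfold natPairs
        rw [hL]
        rw [show ((0 : Nat) :: (m0 + 1) :: L'.map (· + 1)).zip
              (((0 : Nat) :: (m0 + 1) :: L'.map (· + 1)).tail)
            = (0, m0 + 1) :: (((m0 + 1) :: L'.map (· + 1)).zip (L'.map (· + 1))) from rfl]
        have htail : ((m0 + 1) :: L'.map (· + 1)).zip (L'.map (· + 1))
            = ((m0 :: L').zip L').map (Prod.map (· + 1) (· + 1)) := by
          rw [show (m0 + 1) :: L'.map (· + 1) = (m0 :: L').map (· + 1) from rfl, List.zip_map]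
        rw [htail, List.map_cons, List.map_map]
        have : (natEntrada (l :: ls) ∘ Prod.map (· + 1) (· + 1))
            = fun p : Nat × Nat => natEntrada (l :: ls) (p.1 + 1, p.2 + 1) := rfl
        rw [this]
        rw [show (fun p : Nat × Nat => natEntrada (l :: ls) (p.1 + 1, p.2 + 1))
              = natEntrada ls from funext fun p => hshift p]
        have hzt : (m0 :: L').zip L' = natPairs ls := by
          unfold natPairs
          rw [hM]
          rfl
        rw [hzt, ih]
        -- head entry
        have hhead : natEntrada (l :: ls) (0, m0 + 1)
            = dictSub (PySem.Str.strip l)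
                (PySem.Str.join "\n" ((ls.take (firstHdr ls)).filter (fun x => !(PySem.Str.strip x == "")))) := by
          simp [natEntrada, bodyOf, hm0]
        rw [hhead]
        have hfilter_ne : ∀ x ∈ (ls.take (firstHdr ls)).filter (fun x => !(PySem.Str.strip x == "")),
            x ≠ "" := by
          intro x hx
          have := List.of_mem_filter hx
          simp at this
          exact ne_empty_of_strip_ne x this
        rw [← foldl_stepC_join _ hfilter_ne]
        rw [show fromNone (l :: ls) = fromCur (PySem.Str.strip l) "" ls from by simp [fromNone, hcb]]
        rw [fromCur_span ls (PySem.Str.strip l) ""]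

theorem portB_eq_fromNone (conteudo : String) :
    extrair_subsecoes_alt conteudo = fromNone ((PySem.Str.split? conteudo "\n").getD []) := by
  show (((((PySem.List.enumerate ((PySem.Str.split? conteudo "\n").getD [])).filter
      (fun p => ehCab p.2)).map Prod.fst ++ [(((PySem.Str.split? conteudo "\n").getD []).length : Int)]).zip
      _).map (entradaB _)) = _
  generalize ((PySem.Str.split? conteudo "\n").getD []) = linhas
  rw [hdr_eq_natHdr]
  rw [show ([((linhas.length : Nat) : Int)] : List Int)
        = ([linhas.length] : List Nat).map (fun n : Nat => (n : Int)) from rfl]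
  rw [← List.map_append, ← List.map_tail, List.zip_map]
  rw [List.map_map]
  rw [← natBuild_eq_fromNone]
  apply List.map_congr_left
  intro p hp
  have hb := natPairs_bounds linhas p hp
  have : (entradaB linhas ∘ Prod.map (fun n : Nat => (n : Int)) (fun n : Nat => (n : Int))) p
      = entradaB linhas ((p.1 : Int), (p.2 : Int)) := rfl
  rw [this]
  rw [show ((p.1 : Int), (p.2 : Int)) = (((p.1 : Nat) : Int), ((p.2 : Nat) : Int)) from rfl]
  rw [entradaB_nat linhas p.1 p.2 hb.1 hb.2]

-- ===== VERDICT (by name: the statement is the Claim_ definition above) =====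
theorem extrair_subsecoes_spec : Claim_equal_extrair_subsecoes := by
  intro conteudo _
  show extrair_subsecoes conteudo = extrair_subsecoes_alt conteudo
  rw [portA_eq_fromNone, portB_eq_fromNone]
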